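-- pv_equiv track=rewrite | github.com/bgilroy26/advent_of_code | day11/password_tools.py | doubles_test
-- ===== SOURCE A (Python) =====
-- def doubles_test(bytestring):
--     chars = list(bytestring)
--     first_pair = ''
--     for idx, char in enumerate(chars):
--         if idx + 1 >= len(chars):
--             return False
--         if char == chars[idx+1]:
--             if first_pair == '':
--                 first_pair = char + chars[idx+1]
--                 continue
--             if char + chars[idx+1] != first_pair:
--                 return True
-- ===== SOURCE B (Python) =====
-- def doubles_test(bytestring):
--     chars = list(bytestring)
--     pairs = {a + b for a, b in zip(chars, chars[1:]) if a == b}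
--     return len(pairs) >= 2
-- ===== Notes on version B (the rewrite author's own statement) =====
-- stated objective: simpler
-- what changed: A's index-based scan with a sentinel first-pair string and three early returns is replaced by a one-line set comprehension over zipped adjacent pairs followed by a single size check len(pairs) >= 2.
-- outside the precondition, e.g. on doubles_test(''): A returns None, B returns False
import Mathlib
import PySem

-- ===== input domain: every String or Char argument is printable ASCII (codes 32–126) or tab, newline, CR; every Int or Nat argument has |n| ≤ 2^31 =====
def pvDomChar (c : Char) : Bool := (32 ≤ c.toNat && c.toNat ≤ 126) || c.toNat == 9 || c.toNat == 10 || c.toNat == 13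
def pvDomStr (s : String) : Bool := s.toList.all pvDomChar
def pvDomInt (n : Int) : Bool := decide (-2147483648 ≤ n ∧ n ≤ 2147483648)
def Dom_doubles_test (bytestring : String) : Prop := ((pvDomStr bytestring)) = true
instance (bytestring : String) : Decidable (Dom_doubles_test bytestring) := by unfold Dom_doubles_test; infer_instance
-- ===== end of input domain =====

-- B replaces A's sentinel-tracking early-exit scan by a set comprehension over adjacent pairs plus one size check (objective: simpler).


-- ===== PORT A =====
-- the 'for idx, char in enumerate(chars)' loop, carrying the sentinel first_pair;
-- the [] case is the fall-through 'return None' of the empty input (excluded by Pre_)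
def doublesLoopA : List Char → String → Bool
  | [], _ => false
  | [_], _ => false                    -- idx + 1 >= len(chars): return False
  | c :: d :: rest, first =>
    if c = d then
      if first = "" then doublesLoopA (d :: rest) (String.ofList [c, d])
      else if String.ofList [c, d] ≠ first then true
      else doublesLoopA (d :: rest) first
    else doublesLoopA (d :: rest) first

def doubles_test (bytestring : String) : Bool :=
  doublesLoopA bytestring.toList ""

-- ===== PORT B =====
def doubles_test_alt (bytestring : String) : Bool :=
  let chars := bytestring.toList
  let pairs : PySem.Set String :=
    PySem.Set.ofList ((chars.zip chars.tail).filterMap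
      (fun p => if p.1 = p.2 then some (String.ofList [p.1, p.2]) else none))
  decide (2 ≤ pairs.length)

-- ===== PRECONDITION & SPEC =====
-- Pre_ excludes only the empty string, on which A falls off the end of the loop and returns None, not a bool.
def Pre_doubles_test (bytestring : String) : Prop := bytestring ≠ ""
instance (bytestring : String) : Decidable (Pre_doubles_test bytestring) := by unfold Pre_doubles_test; infer_instance
def pvWitness_doubles_test : String := "aabb"

def Spec_doubles_test (bytestring : String) (out : Bool) : Prop := out = doubles_test_alt bytestring
instance (bytestring : String) (out : Bool) : Decidable (Spec_doubles_test bytestring out) := by unfold Spec_doubles_test; infer_instance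

-- ===== CLAIM (what is proved, stated in full; the proofs are below) =====
def Claim_equal_doubles_test : Prop := ∀ (bytestring : String), Dom_doubles_test bytestring → Pre_doubles_test bytestring → Spec_doubles_test bytestring (doubles_test bytestring)

-- ===== LEMMAS AND PROOFS =====

-- the (ordered, possibly repeating) list of adjacent-equal pair strings of chars
def pairsOf : List Char → List String
  | c :: d :: rest => (if c = d then [String.ofList [c, d]] else []) ++ pairsOf (d :: rest)
  | _ => []

theorem mk_pair_ne_empty (c d : Char) : String.ofList [c, d] ≠ "" := by
  simp

-- A's loop with a non-empty sentinel: true iff some later pair differs from it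
theorem loopA_ne_empty : ∀ (l : List Char) (f : String), f ≠ "" →
    doublesLoopA l f = (pairsOf l).any (fun p => p ≠ f) := by
  intro l
  induction l with
  | nil => intro f hf; simp [doublesLoopA, pairsOf]
  | cons c rest ih =>
    cases rest with
    | nil => intro f hf; simp [doublesLoopA, pairsOf]
    | cons d r =>
      intro f hf
      by_cases hcd : c = d
      · subst hcd
        by_cases hp : String.ofList [c, c] = f
        · simp [doublesLoopA, hf, hp, pairsOf, ih f hf]
        · simp [doublesLoopA, hf, hp, pairsOf]
      · simp [doublesLoopA, hcd, pairsOf, ih f hf]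

-- A's loop from the empty sentinel: the first pair seeds the sentinel
theorem loopA_empty : ∀ (l : List Char),
    doublesLoopA l "" = (match pairsOf l with
      | [] => false
      | p :: ps => ps.any (fun q => q ≠ p)) := by
  intro l
  induction l with
  | nil => simp [doublesLoopA, pairsOf]
  | cons c rest ih =>
    cases rest with
    | nil => simp [doublesLoopA, pairsOf]
    | cons d r =>
      by_cases hcd : c = d
      · simp only [doublesLoopA, if_pos hcd]
        rw [loopA_ne_empty (d :: r) (String.ofList [c, d]) (mk_pair_ne_empty c d)]
        simp [pairsOf, hcd]
      · simp only [doublesLoopA, if_neg hcd]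
        rw [ih]
        simp [pairsOf, hcd]

-- B's comprehension list equals pairsOf
theorem filterMap_zip_eq_pairsOf : ∀ (l : List Char),
    (l.zip l.tail).filterMap
      (fun p => if p.1 = p.2 then some (String.ofList [p.1, p.2]) else none) = pairsOf l := by
  intro l
  induction l with
  | nil => simp [pairsOf]
  | cons c rest ih =>
    cases rest with
    | nil => simp [pairsOf]
    | cons d r =>
      simp only [List.tail_cons] at ih
      by_cases hcd : c = d <;>
        simp [pairsOf, List.zip_cons_cons, hcd, ih]

-- a list containing two distinct elements, its Set has length ≥ 2
theorem two_le_of_mem_ne {α : Type} [DecidableEq α] {s : List α} {a b : α}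
    (ha : a ∈ s) (hb : b ∈ s) (hab : a ≠ b) : 2 ≤ s.length := by
  match s with
  | [] => simp at ha
  | [x] =>
    simp at ha hb
    exact absurd (ha.trans hb.symm) hab
  | x :: y :: t => simp

theorem ofList_length_two_iff {α : Type} [DecidableEq α] (l : List α) :
    2 ≤ (PySem.Set.ofList l).length ↔ ∃ a ∈ l, ∃ b ∈ l, a ≠ b := by
  constructor
  · intro h
    match hs : PySem.Set.ofList l with
    | [] => rw [hs] at h; simp at h
    | [x] => rw [hs] at h; simp at h
    | x :: y :: t =>
      have hnd : (PySem.Set.ofList l).Nodup := PySem.Set.nodup_ofList l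
      rw [hs] at hnd
      have hxy : x ≠ y := by
        intro he; exact (List.nodup_cons.mp hnd).1 (he ▸ List.mem_cons_self ..)
      have hx : x ∈ l := (PySem.Set.mem_ofList ..).mp (hs ▸ List.mem_cons_self ..)
      have hy : y ∈ l := (PySem.Set.mem_ofList ..).mp
        (hs ▸ List.mem_cons_of_mem _ (List.mem_cons_self ..))
      exact ⟨x, hx, y, hy, hxy⟩
  · rintro ⟨a, ha, b, hb, hab⟩
    exact two_le_of_mem_ne ((PySem.Set.mem_ofList ..).mpr ha)
      ((PySem.Set.mem_ofList ..).mpr hb) hab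

-- two distinct elements of p :: ps iff some element of ps differs from p
theorem exists_ne_cons_iff {α : Type} (p : α) (ps : List α) :
    (∃ a ∈ p :: ps, ∃ b ∈ p :: ps, a ≠ b) ↔ ∃ q ∈ ps, q ≠ p := by
  constructor
  · rintro ⟨a, ha, b, hb, hab⟩
    rcases List.mem_cons.mp ha with rfl | ha'
    · rcases List.mem_cons.mp hb with rfl | hb'
      · exact absurd rfl hab
      · exact ⟨b, hb', fun he => hab he.symm⟩
    · by_cases hap : a = p
      · subst hap
        rcases List.mem_cons.mp hb with rfl | hb'
        · exact absurd rfl hab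
        · exact ⟨b, hb', fun he => hab he.symm⟩
      · exact ⟨a, ha', hap⟩
  · rintro ⟨q, hq, hqp⟩
    exact ⟨q, List.mem_cons_of_mem _ hq, p, List.mem_cons_self .., hqp⟩

-- ===== VERDICT (by name: the statement is the Claim_ definition above) =====
theorem doubles_test_spec : Claim_equal_doubles_test := by
  intro s _ _
  unfold Spec_doubles_test doubles_test doubles_test_alt
  simp only [filterMap_zip_eq_pairsOf]
  rw [loopA_empty]
  rcases hp : pairsOf s.toList with _ | ⟨p, ps⟩
  · simp [PySem.Set.ofList]
  · simp only [ofList_length_two_iff, exists_ne_cons_iff]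
    rw [Bool.eq_iff_iff]
    simp
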